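-- pv_equiv track=rewrite | github.com/joycevnr/Beecrowd | python/p1/unidade_06/acha_encontros_vocais.py | encontros_vocalicos
-- ===== SOURCE A (Python) =====
-- def encontros_vocalicos(palavra):
--     encontros_vocalicos = []
--     encontro = ''
--     for letra in palavra:
--         if letra in 'aeiouAEIOU':
--             encontro += letra
--         else:
--             if len(encontro) > 1:
--                 encontros_vocalicos.append(encontro)
--             encontro = ''
--     if len(encontro) > 1:
--         encontros_vocalicos.append(encontro)
--
--     return encontros_vocalicos
-- ===== SOURCE B (Python) =====
-- def encontros_vocalicos(palavra):
--     res = []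
--     i, n = 0, len(palavra)
--     while i < n:
--         if palavra[i] in 'aeiouAEIOU':
--             j = i + 1
--             while j < n and palavra[j] in 'aeiouAEIOU':
--                 j += 1
--             if j - i > 1:
--                 res.append(palavra[i:j])
--             i = j
--         else:
--             i += 1
--     return res
-- ===== Notes on version B (the rewrite author's own statement) =====
-- stated objective: alternative
-- what changed: Replaces the accumulate-and-flush character buffer with an index-based span scanner that jumps to the end of each maximal vowel run and extracts it as a slice.
import Mathlib
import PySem

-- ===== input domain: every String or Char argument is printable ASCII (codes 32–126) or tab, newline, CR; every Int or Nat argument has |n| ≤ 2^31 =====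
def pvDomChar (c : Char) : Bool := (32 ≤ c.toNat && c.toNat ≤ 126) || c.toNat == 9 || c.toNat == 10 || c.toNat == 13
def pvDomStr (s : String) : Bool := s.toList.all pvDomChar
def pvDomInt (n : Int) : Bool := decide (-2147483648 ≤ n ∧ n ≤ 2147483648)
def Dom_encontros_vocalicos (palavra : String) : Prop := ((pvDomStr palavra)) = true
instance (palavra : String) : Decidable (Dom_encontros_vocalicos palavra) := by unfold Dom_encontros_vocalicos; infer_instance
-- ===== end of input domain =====

-- B replaces A's accumulate-and-flush buffer with an index/span scanner that slices out each
-- maximal vowel run; alternative structure, same O(n) cost.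


-- shared character class: `letra in 'aeiouAEIOU'` (single char, so substring test = membership)
def isVowel (c : Char) : Bool := "aeiouAEIOU".toList.contains c

-- ===== PORT A =====
-- A's loop: state = (accumulated list, current run buffer `encontro` kept as List Char)
def goA (cs : List Char) (enc : List Char) (acc : List String) : List String :=
  match cs with
  | [] => if enc.length > 1 then acc ++ [String.ofList enc] else acc
  | c :: rest =>
    if isVowel c then goA rest (enc ++ [c]) acc
    else goA rest [] (if enc.length > 1 then acc ++ [String.ofList enc] else acc)

def encontros_vocalicos (palavra : String) : List String :=
  goA palavra.toList [] []

-- ===== PORT B =====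
-- B's outer while-loop as recursion on the remaining suffix; the inner `while j < n and vowel`
-- scan plus the slice palavra[i:j] is exactly takeWhile/dropWhile on the suffix.
def goB (cs : List Char) : List String :=
  match cs with
  | [] => []
  | c :: rest =>
    if isVowel c then
      let run := c :: rest.takeWhile isVowel
      (if run.length > 1 then [String.ofList run] else []) ++ goB (rest.dropWhile isVowel)
    else goB rest
termination_by cs.length
decreasing_by
  · have h := List.length_dropWhile_le isVowel rest
    simp at *; omega
  · simp

def encontros_vocalicos_alt (palavra : String) : List String :=
  goB palavra.toList

-- ===== PRECONDITION & SPEC =====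
def Spec_encontros_vocalicos (palavra : String) (out : List String) : Prop := out = encontros_vocalicos_alt palavra
instance (palavra : String) (out : List String) : Decidable (Spec_encontros_vocalicos palavra out) := by unfold Spec_encontros_vocalicos; infer_instance

-- ===== CLAIM (what is proved, stated in full; the proofs are below) =====
def Claim_equal_encontros_vocalicos : Prop := ∀ (palavra : String), Dom_encontros_vocalicos palavra → Spec_encontros_vocalicos palavra (encontros_vocalicos palavra)

-- ===== LEMMAS AND PROOFS =====
theorem takeWhile_all_append {p : Char → Bool} {enc : List Char} {d : Char} {rest : List Char}
    (h : ∀ c ∈ enc, p c = true) (hd : p d = false) :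
    (enc ++ d :: rest).takeWhile p = enc := by
  induction enc with
  | nil => simp [hd]
  | cons e es ih =>
    have he : p e = true := h e (by simp)
    simp [he]
    exact ih (fun c hc => h c (by simp [hc]))

theorem dropWhile_all_append {p : Char → Bool} {enc : List Char} {d : Char} {rest : List Char}
    (h : ∀ c ∈ enc, p c = true) (hd : p d = false) :
    (enc ++ d :: rest).dropWhile p = d :: rest := by
  induction enc with
  | nil => simp [hd]
  | cons e es ih =>
    have he : p e = true := h e (by simp)
    simp [he]
    exact ih (fun c hc => h c (by simp [hc]))

theorem takeWhile_all {p : Char → Bool} {enc : List Char} (h : ∀ c ∈ enc, p c = true) :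
    enc.takeWhile p = enc := List.takeWhile_eq_self_iff.mpr h

theorem dropWhile_all {p : Char → Bool} {enc : List Char} (h : ∀ c ∈ enc, p c = true) :
    enc.dropWhile p = [] := List.dropWhile_eq_nil_iff.mpr (fun _ hc => h _ hc)

theorem goA_eq_goB (cs : List Char) : ∀ (enc : List Char) (acc : List String),
    (∀ c ∈ enc, isVowel c = true) →
    goA cs enc acc = acc ++ goB (enc ++ cs) := by
  induction cs with
  | nil =>
    intro enc acc h
    match enc with
    | [] => simp [goA, goB]
    | e :: es =>
      have he : isVowel e = true := h e (by simp)
      rw [goA, List.append_nil, goB]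
      simp only [he, if_true]
      rw [takeWhile_all (fun c hc => h c (by simp [hc])),
          dropWhile_all (fun c hc => h c (by simp [hc])), goB]
      split_ifs <;> simp
  | cons c rest ih =>
    intro enc acc h
    by_cases hv : isVowel c = true
    · rw [goA]
      simp only [hv, if_true]
      rw [ih (enc ++ [c]) acc (by intro x hx; rcases List.mem_append.mp hx with h1 | h1
                                  · exact h x h1
                                  · simp at h1; subst h1; exact hv)]
      simp
    · have hv' : isVowel c = false := by simpa using hv
      rw [goA]
      simp only [hv', Bool.false_eq_true, if_false]
      rw [ih [] _ (by simp)]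
      simp only [List.nil_append]
      match enc with
      | [] =>
        simp only [List.nil_append, List.length_nil]
        rw [goB]
        simp [hv']
      | e :: es =>
        have he : isVowel e = true := h e (by simp)
        have hall : ∀ x ∈ es, isVowel x = true := fun x hx => h x (by simp [hx])
        rw [show ((e :: es) ++ c :: rest) = e :: (es ++ c :: rest) by simp, goB]
        simp only [he, if_true]
        rw [takeWhile_all_append hall hv', dropWhile_all_append hall hv', goB]
        simp only [hv', Bool.false_eq_true, if_false]
        split_ifs <;> simp

-- ===== VERDICT (by name: the statement is the Claim_ definition above) =====
theorem encontros_vocalicos_spec : Claim_equal_encontros_vocalicos := by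
  intro palavra _
  unfold Spec_encontros_vocalicos encontros_vocalicos encontros_vocalicos_alt
  simpa using goA_eq_goB palavra.toList [] [] (by simp)
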